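-- pv_equiv track=rewrite | github.com/suehyunpark/BARC | heatmap_train_pairs.py | is_strictly_better
-- ===== SOURCE A (Python) =====
-- from typing import List, Dict, Any, Tuple
--
-- def is_strictly_better(h1_verdicts: List[bool], h2_verdicts: List[bool]) -> bool:
--     """Check if h2 is strictly better than h1 (h1 < h2)"""
--     if len(h1_verdicts) != len(h2_verdicts):
--         return False
--
--     has_extra = False
--     for v1, v2 in zip(h1_verdicts, h2_verdicts):
--         # Check True predictions
--         if v1 is True and v2 is not True:
--             return False
--         if v1 is not True and v2 is True:
--             has_extra = True
--             continue
--
--         # If neither has True, check False vs None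
--         if v1 is False and v2 is None:
--             return False
--         if v1 is None and v2 is False:
--             has_extra = True
--
--     return has_extra
-- ===== SOURCE B (Python) =====
-- def is_strictly_better(h1_verdicts, h2_verdicts):
--     """Check if h2 is strictly better than h1 (h1 < h2)"""
--     if len(h1_verdicts) != len(h2_verdicts):
--         return False
--
--     def worse(a, b):
--         return (a is True and b is not True) or (a is False and b is None)
--
--     def better(a, b):
--         return (a is not True and b is True) or (a is None and b is False)
--
--     if any(worse(a, b) for a, b in zip(h1_verdicts, h2_verdicts)):
--         return False
--     return any(better(a, b) for a, b in zip(h1_verdicts, h2_verdicts))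
-- ===== Notes on version B (the rewrite author's own statement) =====
-- stated objective: simpler
-- what changed: Replaces A's single interleaved loop with early returns and a has_extra accumulator by two declarative any() scans over element-wise worse/better predicates.
import Mathlib
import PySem

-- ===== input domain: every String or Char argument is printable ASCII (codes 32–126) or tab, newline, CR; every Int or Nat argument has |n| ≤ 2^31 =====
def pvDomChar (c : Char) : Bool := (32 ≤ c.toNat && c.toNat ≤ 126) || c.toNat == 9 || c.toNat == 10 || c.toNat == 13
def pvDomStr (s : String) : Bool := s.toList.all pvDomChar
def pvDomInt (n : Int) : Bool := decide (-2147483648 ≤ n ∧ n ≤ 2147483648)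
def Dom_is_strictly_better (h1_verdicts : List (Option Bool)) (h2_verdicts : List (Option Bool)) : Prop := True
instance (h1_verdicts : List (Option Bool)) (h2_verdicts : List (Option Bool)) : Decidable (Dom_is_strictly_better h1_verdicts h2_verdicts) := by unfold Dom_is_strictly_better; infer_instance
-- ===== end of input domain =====

-- B replaces A's single interleaved accumulator loop (early returns + has_extra flag)
-- with two declarative any-scans over element-wise worse/better predicates (objective: simpler).


-- ===== PORT A =====
-- A's for-loop over zip with early 'return False' and the has_extra accumulator,
-- transcribed as structural recursion carrying the accumulator; branches in A's order.
def isbLoopA : List (Option Bool) → List (Option Bool) → Bool → Bool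
  | [], _, acc => acc
  | _ :: _, [], acc => acc
  | v1 :: t1, v2 :: t2, acc =>
    if v1 = some true ∧ v2 ≠ some true then false
    else if v1 ≠ some true ∧ v2 = some true then isbLoopA t1 t2 true
    else if v1 = some false ∧ v2 = none then false
    else if v1 = none ∧ v2 = some false then isbLoopA t1 t2 true
    else isbLoopA t1 t2 acc

def is_strictly_better (h1_verdicts : List (Option Bool)) (h2_verdicts : List (Option Bool)) : Bool :=
  if h1_verdicts.length ≠ h2_verdicts.length then false
  else isbLoopA h1_verdicts h2_verdicts false

-- ===== PORT B =====
def isbWorse (a b : Option Bool) : Bool :=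
  (a = some true ∧ b ≠ some true) ∨ (a = some false ∧ b = none)

def isbBetter (a b : Option Bool) : Bool :=
  (a ≠ some true ∧ b = some true) ∨ (a = none ∧ b = some false)

def is_strictly_better_alt (h1_verdicts : List (Option Bool)) (h2_verdicts : List (Option Bool)) : Bool :=
  if h1_verdicts.length ≠ h2_verdicts.length then false
  else if (h1_verdicts.zip h2_verdicts).any (fun p => isbWorse p.1 p.2) then false
  else (h1_verdicts.zip h2_verdicts).any (fun p => isbBetter p.1 p.2)

-- ===== PRECONDITION & SPEC =====
def Spec_is_strictly_better (h1_verdicts : List (Option Bool)) (h2_verdicts : List (Option Bool)) (out : Bool) : Prop := out = is_strictly_better_alt h1_verdicts h2_verdicts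
instance (h1_verdicts : List (Option Bool)) (h2_verdicts : List (Option Bool)) (out : Bool) : Decidable (Spec_is_strictly_better h1_verdicts h2_verdicts out) := by unfold Spec_is_strictly_better; infer_instance

-- ===== CLAIM (what is proved, stated in full; the proofs are below) =====
def Claim_equal_is_strictly_better : Prop := ∀ (h1_verdicts : List (Option Bool)) (h2_verdicts : List (Option Bool)), Dom_is_strictly_better h1_verdicts h2_verdicts → Spec_is_strictly_better h1_verdicts h2_verdicts (is_strictly_better h1_verdicts h2_verdicts)

-- ===== LEMMAS AND PROOFS =====
-- Loop invariant: A's loop equals 'no worse pair, and (acc or some better pair)'.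
theorem isbLoopA_eq (l1 l2 : List (Option Bool)) (acc : Bool) :
    isbLoopA l1 l2 acc =
      (!(l1.zip l2).any (fun p => isbWorse p.1 p.2) &&
        (acc || (l1.zip l2).any (fun p => isbBetter p.1 p.2))) := by
  induction l1 generalizing l2 acc with
  | nil => cases l2 <;> simp [isbLoopA]
  | cons v1 t1 ih =>
    cases l2 with
    | nil => simp [isbLoopA]
    | cons v2 t2 =>
      simp only [isbLoopA, List.zip_cons_cons, List.any_cons]
      rcases v1 with _ | (_ | _) <;> rcases v2 with _ | (_ | _) <;>
        simp [isbWorse, isbBetter, ih] <;> cases acc <;> simp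

-- ===== VERDICT (by name: the statement is the Claim_ definition above) =====
theorem is_strictly_better_spec : Claim_equal_is_strictly_better := by
  intro h1 h2 _
  unfold Spec_is_strictly_better is_strictly_better is_strictly_better_alt
  split_ifs with hlen hw
  · rfl
  · simp [isbLoopA_eq, hw]
  · simp [isbLoopA_eq, hw]
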